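-- pv_equiv track=rewrite | github.com/MortezaRezaalipour/VerilogChecker | checker/verilog.py | _buffer_signature
-- ===== SOURCE A (Python) =====
-- def _buffer_signature(verilog_str: str) -> str:
--     """
--     Buffers content from 'module' to the first ');' in the Verilog code string.
--
--     Args:
--         verilog_code (str): Verilog code as a single string.
--
--     Returns:
--         str: The complete module declaration as a single string.
--     """
--     buffer = ""  # To accumulate lines
--     inside_module = False  # Flag to detect when we're inside the module declaration
--
--     for line in verilog_str.splitlines():  # Split the single string into lines
--         line = line.strip()  # Remove leading and trailing spaces
--
--         # Check if the line starts with 'module' (beginning of the declaration)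
--         if line.startswith("module"):
--             inside_module = True  # Start buffering
--             buffer += line + " "  # Add the line to the buffer
--         elif inside_module:
--             buffer += line + " "  # Continue buffering
--             if ");" in line:  # Check if the module declaration ends
--                 break  # Exit the loop once the module declaration is complete
--
--     return buffer.strip()
-- ===== SOURCE B (Python) =====
-- def _buffer_signature(verilog_str: str) -> str:
--     lines = [l.strip() for l in verilog_str.splitlines()]
--     start = next((i for i, l in enumerate(lines) if l.startswith("module")), None)
--     if start is None:
--         return ""
--     end = next((i for i in range(start, len(lines)) if ");" in lines[i]), len(lines) - 1)
--     return " ".join(lines[start:end + 1]).strip()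
-- ===== Notes on version B (the rewrite author's own statement) =====
-- stated objective: alternative
-- what changed: Replaces A's single stateful accumulate-loop (buffer string + inside_module flag + break) by a locate-then-slice decomposition: strip all lines once, find the index of the first 'module' line, find the end index (first line from there on containing ');', else the last line), and join the slice.
-- intended difference: When, scanning from the first line whose strip starts with 'module', the first line containing ');' itself starts with 'module' and a non-blank line follows it, A keeps buffering past that line until a later non-module ');' line or the end of input, while B ends the declaration at that ');' line, which is the intended end of the module header. — e.g. on _buffer_signature("module m(a);\nendmodule"): A returns "module m(a); endmodule", B returns "module m(a);"
import Mathlib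
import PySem

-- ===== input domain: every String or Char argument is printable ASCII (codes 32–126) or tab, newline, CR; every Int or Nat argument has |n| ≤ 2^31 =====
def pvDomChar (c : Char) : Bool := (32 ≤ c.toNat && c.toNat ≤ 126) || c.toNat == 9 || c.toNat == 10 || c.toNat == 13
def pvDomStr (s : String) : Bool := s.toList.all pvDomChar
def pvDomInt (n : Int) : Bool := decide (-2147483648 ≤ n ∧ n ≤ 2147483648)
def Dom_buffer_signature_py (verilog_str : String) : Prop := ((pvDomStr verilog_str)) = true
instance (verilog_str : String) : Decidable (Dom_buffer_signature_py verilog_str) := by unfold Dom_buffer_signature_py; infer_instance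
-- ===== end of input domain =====

-- B replaces A's stateful accumulate-loop by locate-boundaries-then-slice-and-join;
-- on D_ (one-line/module-prefixed ');' headers) A over-buffers and B returns the intended header.

-- shared primitive tests: line.startswith('module'), ');' in line
def isModLC (l : List Char) : Bool := PySem.Chars.startswith l "module".toList

def hasParenLC (l : List Char) : Bool := PySem.Chars.isIn ");".toList l

-- ===== PORT A =====
-- literal port of A's loop: strip each line; a 'module'-prefixed line starts/continues
-- buffering (no ');' check there); once inside, every line is appended and a non-'module'
-- line containing ');' breaks the loop.
def bufLoopA : List (List Char) → List Char → Bool → List Char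
  | [], buf, _ => buf
  | raw :: rest, buf, inside =>
    let line := PySem.Chars.strip raw
    if isModLC line then
      bufLoopA rest (buf ++ line ++ [' ']) true
    else if inside then
      if hasParenLC line then buf ++ line ++ [' ']
      else bufLoopA rest (buf ++ line ++ [' ']) inside
    else bufLoopA rest buf inside

def buffer_signature_py (verilog_str : String) : String :=
  String.mk (PySem.Chars.strip (bufLoopA (PySem.Chars.splitlines verilog_str.toList) [] false))

-- ===== PORT B =====
def stripLines (verilog_str : String) : List (List Char) :=
  (PySem.Chars.splitlines verilog_str.toList).map PySem.Chars.strip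

-- B's 'next((i for i in range(start, len(lines)) if ");" in lines[i]), len(lines) - 1)':
-- first index ≥ start whose line contains ');', else the last index
def bFindEnd (lines : List (List Char)) (start : Nat) : Nat :=
  match (lines.drop start).findIdx? hasParenLC with
  | some k => start + k
  | none => lines.length - 1

def buffer_signature_py_alt (verilog_str : String) : String :=
  match (stripLines verilog_str).findIdx? isModLC with
  | none => ""
  | some start =>
      String.mk (PySem.Chars.strip (PySem.Chars.join [' ']
        (PySem.List.slice (stripLines verilog_str)
          (some (start : Int))
          (some ((bFindEnd (stripLines verilog_str) start : Int) + 1)))))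

-- ===== PRECONDITION & SPEC =====
-- When the first ');' line at/after the first 'module' line is itself 'module'-prefixed and a
-- non-blank line follows it, A buffers past it; B ends the header at that line (intended).
def D_buffer_signature_py (verilog_str : String) : Prop :=
  (match ((((PySem.Chars.splitlines verilog_str.toList).map PySem.Chars.strip).dropWhile
      (fun l => !isModLC l)).dropWhile (fun l => !hasParenLC l)) with
   | [] => false
   | x :: r => isModLC x && r.any (fun l => !l.isEmpty)) = true
instance (verilog_str : String) : Decidable (D_buffer_signature_py verilog_str) := by
  unfold D_buffer_signature_py; infer_instance

def Spec_buffer_signature_py (verilog_str : String) (out : String) : Prop :=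
  ¬ D_buffer_signature_py verilog_str → out = buffer_signature_py_alt verilog_str
instance (verilog_str : String) (out : String) : Decidable (Spec_buffer_signature_py verilog_str out) := by
  unfold Spec_buffer_signature_py; infer_instance

def pvDiffWitness_buffer_signature_py : String := "module m(a);\nendmodule"
def pvDiffWitnessOut_buffer_signature_py : String × String :=
  ("module m(a); endmodule", "module m(a);")

-- ===== CLAIM (what is proved, stated in full; the proofs are below) =====
def Claim_unchanged_buffer_signature_py : Prop := ∀ (verilog_str : String), Dom_buffer_signature_py verilog_str → Spec_buffer_signature_py verilog_str (buffer_signature_py verilog_str)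
def Claim_exact_buffer_signature_py : Prop := ∀ (verilog_str : String), Dom_buffer_signature_py verilog_str → D_buffer_signature_py verilog_str → buffer_signature_py verilog_str ≠ buffer_signature_py_alt verilog_str
def Claim_changed_buffer_signature_py : Prop := Dom_buffer_signature_py (pvDiffWitness_buffer_signature_py) ∧ D_buffer_signature_py (pvDiffWitness_buffer_signature_py) ∧ buffer_signature_py (pvDiffWitness_buffer_signature_py) = pvDiffWitnessOut_buffer_signature_py.1 ∧ buffer_signature_py_alt (pvDiffWitness_buffer_signature_py) = pvDiffWitnessOut_buffer_signature_py.2 ∧ pvDiffWitnessOut_buffer_signature_py.1 ≠ pvDiffWitnessOut_buffer_signature_py.2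

-- ===== LEMMAS AND PROOFS =====

-- A's loop on the already-stripped lines (strip pulled out of the loop)
def loopAS : List (List Char) → List Char → Bool → List Char
  | [], buf, _ => buf
  | line :: rest, buf, inside =>
    if isModLC line then loopAS rest (buf ++ line ++ [' ']) true
    else if inside then
      if hasParenLC line then buf ++ line ++ [' ']
      else loopAS rest (buf ++ line ++ [' ']) inside
    else loopAS rest buf inside

-- A's end condition
def bIsEnd (l : List Char) : Bool := hasParenLC l && !isModLC l

lemma bufLoopA_eq_loopAS (raws : List (List Char)) (buf : List Char) (inside : Bool) :
    bufLoopA raws buf inside = loopAS (raws.map PySem.Chars.strip) buf inside := by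
  induction raws generalizing buf inside with
  | nil => rfl
  | cons r rs ih =>
    simp only [bufLoopA, loopAS, List.map_cons]
    split_ifs <;> simp only [ih]

-- the lines A buffers after the start line: everything up to and including the first
-- non-'module' line containing ');'
def takeThrough : List (List Char) → List (List Char)
  | [] => []
  | x :: xs => if bIsEnd x then [x] else x :: takeThrough xs

lemma loopAS_skip (pre xs : List (List Char)) (buf : List Char)
    (h : ∀ l ∈ pre, isModLC l = false) :
    loopAS (pre ++ xs) buf false = loopAS xs buf false := by
  induction pre with
  | nil => rfl
  | cons p ps ih =>
    have hp : isModLC p = false := h p (by simp)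
    simp only [List.cons_append, loopAS, hp, Bool.false_eq_true, if_false]
    exact ih (fun l hl => h l (List.mem_cons_of_mem p hl))

lemma loopAS_inside (ls : List (List Char)) (buf : List Char) :
    loopAS ls buf true = buf ++ (takeThrough ls).flatMap (· ++ [' ']) := by
  induction ls generalizing buf with
  | nil => simp [loopAS, takeThrough]
  | cons x xs ih =>
    simp only [loopAS, takeThrough]
    cases hs : isModLC x with
    | true =>
      have he : bIsEnd x = false := by simp [bIsEnd, hs]
      simp [he, ih, List.append_assoc]
    | false =>
      cases hin : hasParenLC x with
      | true =>
        have he : bIsEnd x = true := by simp [bIsEnd, hs, hin]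
        simp [he]
      | false =>
        have he : bIsEnd x = false := by simp [bIsEnd, hin]
        simp [he, ih, List.append_assoc]

lemma findIdx?_split {α : Type} (p : α → Bool) (ls : List α) (s : Nat)
    (h : ls.findIdx? p = some s) :
    ∃ pre m rest, ls = pre ++ m :: rest ∧ pre.length = s ∧
      (∀ l ∈ pre, p l = false) ∧ p m = true := by
  induction ls generalizing s with
  | nil => simp at h
  | cons x xs ih =>
    rw [List.findIdx?_cons] at h
    by_cases hx : p x = true
    · rw [if_pos hx] at h
      injection h with h'
      exact ⟨[], x, xs, rfl, by simpa using h', by simp, hx⟩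
    · rw [if_neg hx] at h
      have hx' : p x = false := by rwa [Bool.not_eq_true] at hx
      cases hfi : xs.findIdx? p with
      | none => rw [hfi] at h; simp at h
      | some j =>
        rw [hfi] at h
        simp only [Option.map_some] at h
        injection h with h'
        obtain ⟨pre, m, rest, h1, h2, h3, h4⟩ := ih j hfi
        refine ⟨x :: pre, m, rest, by rw [h1, List.cons_append], ?_, ?_, h4⟩
        · simp only [List.length_cons, h2]; omega
        · intro l hl
          rcases List.mem_cons.mp hl with heq | hmem
          · rw [heq]; exact hx'
          · exact h3 l hmem

lemma bFindEnd_spec (rest pre : List (List Char)) :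
    bFindEnd (pre ++ rest) pre.length =
      match rest.findIdx? hasParenLC with
      | some j => pre.length + j
      | none => (pre ++ rest).length - 1 := by
  unfold bFindEnd
  rw [List.drop_append_of_le_length (Nat.le_refl pre.length)]
  simp

lemma takeThrough_of_no_paren (rest : List (List Char))
    (h : ∀ l ∈ rest, hasParenLC l = false) :
    takeThrough rest = rest := by
  induction rest with
  | nil => rfl
  | cons x xs ih =>
    have hx : hasParenLC x = false := h x (by simp)
    have he : bIsEnd x = false := by simp [bIsEnd, hx]
    simp only [takeThrough, he, Bool.false_eq_true, if_false]
    rw [ih (fun l hl => h l (List.mem_cons_of_mem x hl))]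

lemma takeThrough_skip (q zs : List (List Char))
    (h : ∀ l ∈ q, hasParenLC l = false) :
    takeThrough (q ++ zs) = q ++ takeThrough zs := by
  induction q with
  | nil => rfl
  | cons x xs ih =>
    have hx : hasParenLC x = false := h x (by simp)
    have he : bIsEnd x = false := by simp [bIsEnd, hx]
    simp only [List.cons_append, takeThrough, he, Bool.false_eq_true, if_false]
    rw [ih (fun l hl => h l (List.mem_cons_of_mem x hl))]

lemma flatMap_all_empty (es : List (List Char)) (h : ∀ l ∈ es, l = []) :
    es.flatMap (· ++ [' ']) = List.replicate es.length ' ' := by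
  induction es with
  | nil => rfl
  | cons x xs ih =>
    have hx : x = [] := h x (by simp)
    simp only [List.flatMap_cons, hx, List.nil_append, List.length_cons,
      List.replicate_succ]
    rw [ih (fun l hl => h l (List.mem_cons_of_mem x hl))]
    rfl

lemma rstrip_append_space (u : List Char) :
    PySem.Chars.rstrip (u ++ [' ']) = PySem.Chars.rstrip u := by
  have hsp : PySem.Chars.isspace ' ' = true := by decide
  simp only [PySem.Chars.rstrip, List.reverse_append, List.reverse_cons, List.reverse_nil,
    List.nil_append, List.singleton_append, List.dropWhile_cons, hsp, if_pos]

lemma strip_append_space (t : List Char) :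
    PySem.Chars.strip (t ++ [' ']) = PySem.Chars.strip t := by
  simp only [PySem.Chars.strip, PySem.Chars.lstrip, List.dropWhile_append]
  by_cases h : (List.dropWhile PySem.Chars.isspace t).isEmpty
  · rw [if_pos h]
    have h2 : List.dropWhile PySem.Chars.isspace t = [] := by
      simpa [List.isEmpty_iff] using h
    rw [h2]
    decide
  · rw [if_neg h]
    exact rstrip_append_space _

lemma strip_append_replicate (k : Nat) (t : List Char) :
    PySem.Chars.strip (t ++ List.replicate k ' ') = PySem.Chars.strip t := by
  induction k generalizing t with
  | zero => simp
  | succ n ih =>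
    have : t ++ List.replicate (n + 1) ' ' = (t ++ [' ']) ++ List.replicate n ' ' := by
      simp [List.replicate_succ]
    rw [this, ih, strip_append_space]

lemma flatMap_space_eq_join (m : List Char) (rest : List (List Char)) :
    (m :: rest).flatMap (· ++ [' ']) = PySem.Chars.join [' '] (m :: rest) ++ [' '] := by
  induction rest generalizing m with
  | nil => simp [PySem.Chars.join_singleton]
  | cons y ys ih =>
    rw [PySem.Chars.join_cons_cons]
    simp only [List.flatMap_cons] at ih ⊢
    rw [ih y]
    simp [List.append_assoc]

-- strip of the flatMap equals B's strip-of-join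
lemma strip_flatMap_eq_strip_join (m : List Char) (rest : List (List Char)) :
    PySem.Chars.strip ((m :: rest).flatMap (· ++ [' '])) =
      PySem.Chars.strip (PySem.Chars.join [' '] (m :: rest)) := by
  rw [flatMap_space_eq_join, strip_append_space]

-- A's buffer shape as a flatMap over the cons list
lemma buf_shape (m : List Char) (t : List (List Char)) :
    m ++ [' '] ++ t.flatMap (· ++ [' ']) = (m :: t).flatMap (· ++ [' ']) := by simp

lemma take_mid (q : List (List Char)) (x : List Char) (t : List (List Char)) :
    (q ++ x :: t).take (q.length + 1) = q ++ [x] := by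
  induction q with
  | nil => rfl
  | cons y ys ih => simp [List.take_succ_cons, ih]

lemma dropWhile_mid (p : List Char → Bool) (q : List (List Char)) (m : List Char)
    (rest : List (List Char)) (hq : ∀ l ∈ q, p l = true) (hm : p m = false) :
    (q ++ m :: rest).dropWhile p = m :: rest := by
  induction q with
  | nil => simp [hm]
  | cons y ys ih =>
    have hy : p y = true := hq y (by simp)
    simp only [List.cons_append, List.dropWhile_cons, hy, if_pos]
    exact ih (fun l hl => hq l (List.mem_cons_of_mem y hl))

-- count of non-space characters: invariant under strip, the measure separating A from B inside D_
def cntNS (l : List Char) : Nat := l.countP (fun c => !PySem.Chars.isspace c)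

lemma cntNS_dropWhile_isspace (t : List Char) :
    cntNS (t.dropWhile PySem.Chars.isspace) = cntNS t := by
  induction t with
  | nil => rfl
  | cons h hs ih =>
    by_cases hsp : PySem.Chars.isspace h = true
    · simp only [List.dropWhile_cons, hsp, if_pos, cntNS, List.countP_cons,
        Bool.not_true]
      simp only [Bool.false_eq_true, if_false, Nat.add_zero]
      exact ih
    · simp [hsp]

lemma cntNS_strip (t : List Char) : cntNS (PySem.Chars.strip t) = cntNS t := by
  have hr : ∀ u : List Char, cntNS (PySem.Chars.rstrip u) = cntNS u := by
    intro u
    show cntNS (u.reverse.dropWhile PySem.Chars.isspace).reverse = cntNS u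
    unfold cntNS
    unfold cntNS at *
    rw [List.countP_reverse]
    conv_rhs => rw [← List.countP_reverse]
    exact cntNS_dropWhile_isspace u.reverse
  show cntNS (PySem.Chars.rstrip (PySem.Chars.lstrip t)) = cntNS t
  rw [hr]
  exact cntNS_dropWhile_isspace t

lemma cntNS_pos_of_strip_ne_nil (r : List Char) (h : PySem.Chars.strip r ≠ []) :
    0 < cntNS (PySem.Chars.strip r) := by
  rcases Nat.eq_zero_or_pos (cntNS (PySem.Chars.strip r)) with h0 | h0
  · exfalso
    rw [cntNS_strip] at h0
    have hall : ∀ c ∈ r, PySem.Chars.isspace c = true := by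
      intro c hc
      have := List.countP_eq_zero.mp h0 c hc
      simpa using this
    have hl : PySem.Chars.lstrip r = [] := by
      show r.dropWhile PySem.Chars.isspace = []
      exact List.dropWhile_eq_nil_iff.mpr (by simpa using hall)
    apply h
    show PySem.Chars.rstrip (PySem.Chars.lstrip r) = []
    rw [hl]
    rfl
  · exact h0

lemma cntNS_mem_stripLines (v : String) (e : List Char) (he : e ∈ stripLines v)
    (hne : e ≠ []) : 0 < cntNS e := by
  obtain ⟨raw, _, hraw⟩ := List.mem_map.mp he
  rw [← hraw] at hne ⊢
  exact cntNS_pos_of_strip_ne_nil raw hne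

lemma cntNS_flatMap_pos (T : List (List Char)) (e : List Char) (he : e ∈ T)
    (hp : 0 < cntNS e) : 0 < cntNS (T.flatMap (· ++ [' '])) := by
  obtain ⟨c, hc, hcp⟩ := List.countP_pos_iff.mp hp
  exact List.countP_pos_iff.mpr
    ⟨c, List.mem_flatMap.mpr ⟨e, he, List.mem_append_left _ hc⟩, hcp⟩

lemma cntNS_append (u w : List Char) : cntNS (u ++ w) = cntNS u + cntNS w := by
  simp [cntNS]

lemma cntNS_space_singleton : cntNS [' '] = 0 := by decide

-- a nonempty line of stripLines survives into A's buffered tail: either takeThrough keeps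
-- it, or takeThrough stops at a ');' line, which is itself nonempty
lemma takeThrough_cnt (r : List (List Char)) (hs : ∀ e ∈ r, e ≠ [] → 0 < cntNS e)
    (hr : ∃ e ∈ r, e ≠ []) : ∃ e ∈ takeThrough r, 0 < cntNS e := by
  induction r with
  | nil => obtain ⟨e, he, _⟩ := hr; exact absurd he (List.not_mem_nil)
  | cons y ys ih =>
    by_cases hy : bIsEnd y = true
    · refine ⟨y, by simp [takeThrough, hy], ?_⟩
      apply hs y (by simp)
      intro hnil
      rw [hnil] at hy
      exact absurd hy (by decide)
    · simp only [takeThrough, hy, Bool.false_eq_true, if_false]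
      obtain ⟨e, he, hne⟩ := hr
      rcases List.mem_cons.mp he with rfl | hmem
      · exact ⟨e, by simp, hs e (by simp) hne⟩
      · obtain ⟨e', he', hp'⟩ := ih (fun a ha => hs a (List.mem_cons_of_mem y ha))
          ⟨e, hmem, hne⟩
        exact ⟨e', List.mem_cons_of_mem y he', hp'⟩

-- a nonempty dropWhile (¬p) splits the list at its first p-element
lemma dropWhile_not_decomp (p : List Char → Bool) (L : List (List Char))
    (m : List Char) (rest : List (List Char))
    (h : L.dropWhile (fun a => !p a) = m :: rest) :
    ∃ pre, L = pre ++ m :: rest ∧ (∀ l ∈ pre, p l = false) ∧ p m = true := by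
  induction L with
  | nil => simp at h
  | cons a as ih =>
    rw [List.dropWhile_cons] at h
    by_cases hap : p a = true
    · rw [if_neg (by simp [hap])] at h
      injection h with h1 h2
      exact ⟨[], by rw [h1, h2]; rfl, by simp, by rw [← h1]; exact hap⟩
    · rw [if_pos (by simp [Bool.not_eq_true] at hap ⊢; exact hap)] at h
      obtain ⟨pre, hL, hpre, hm⟩ := ih h
      refine ⟨a :: pre, by rw [List.cons_append, hL], ?_, hm⟩
      intro l hl
      rcases List.mem_cons.mp hl with rfl | hmem
      · rwa [Bool.not_eq_true] at hap
      · exact hpre l hmem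

lemma findIdx?_of_decomp {α : Type} (p : α → Bool) (pre : List α) (m : α) (rest : List α)
    (hpre : ∀ l ∈ pre, p l = false) (hm : p m = true) :
    (pre ++ m :: rest).findIdx? p = some pre.length := by
  induction pre with
  | nil => simp [List.findIdx?_cons, hm]
  | cons a as ih =>
    have ha : p a = false := hpre a (by simp)
    rw [List.cons_append, List.findIdx?_cons, if_neg (by simp [ha])]
    rw [ih (fun l hl => hpre l (List.mem_cons_of_mem a hl))]
    simp

-- main equality outside D_
lemma main_eq (v : String) (hD : ¬ D_buffer_signature_py v) :
    PySem.Chars.strip (loopAS (stripLines v) [] false) =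
      (match (stripLines v).findIdx? isModLC with
       | none => ([] : List Char)
       | some start =>
          PySem.Chars.strip (PySem.Chars.join [' ']
            (PySem.List.slice (stripLines v) (some (start : Int))
              (some ((bFindEnd (stripLines v) start : Int) + 1))))) := by
  cases hfi : (stripLines v).findIdx? isModLC with
  | none =>
    have hall : ∀ l ∈ stripLines v, isModLC l = false := by
      intro l hl
      have := List.findIdx?_eq_none_iff.mp hfi l hl
      simpa using this
    have h0 : loopAS (stripLines v) [] false = loopAS [] [] false := by
      simpa using loopAS_skip (stripLines v) [] [] hall
    rw [h0]
    show PySem.Chars.strip (loopAS [] [] false) = ([] : List Char)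
    decide
  | some start =>
    obtain ⟨pre, m, rest, h1, h2, h3, h4⟩ := findIdx?_split isModLC (stripLines v) start hfi
    unfold D_buffer_signature_py at hD
    have hDa : ¬ ((match (((stripLines v).dropWhile (fun l => !isModLC l)).dropWhile
          (fun l => !hasParenLC l)) with
        | [] => false
        | x :: r => isModLC x && r.any (fun l => !l.isEmpty)) = true) :=
      fun h => hD h
    rw [h1] at hDa
    rw [h1]
    rw [loopAS_skip pre (m :: rest) [] h3]
    simp only [loopAS]
    rw [if_pos h4]
    rw [loopAS_inside]
    simp only [List.nil_append]
    have hdrop : (pre ++ m :: rest).drop start = m :: rest := by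
      rw [← h2]; simp
    have hw1 : (pre ++ m :: rest).dropWhile (fun l => !isModLC l) = m :: rest :=
      dropWhile_mid _ pre m rest (fun l hl => by rw [h3 l hl]; rfl) (by rw [h4]; rfl)
    rw [hw1] at hDa
    clear hD
    -- B's end index
    have hend := bFindEnd_spec (m :: rest) pre
    rw [h2] at hend
    have hcast : ((bFindEnd (pre ++ m :: rest) start : Int) + 1)
        = ((bFindEnd (pre ++ m :: rest) start + 1 : Nat) : Int) := by push_cast; ring
    rw [hcast, PySem.List.slice_natCast, hdrop]
    cases hfe : (m :: rest).findIdx? hasParenLC with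
    | none =>
      -- no ');' anywhere from start: both take everything
      rw [hfe] at hend
      rw [hend]
      have hnp : ∀ l ∈ m :: rest, hasParenLC l = false := by
        intro l hl
        have := List.findIdx?_eq_none_iff.mp hfe l hl
        simpa using this
      have htt : takeThrough rest = rest :=
        takeThrough_of_no_paren rest (fun l hl => hnp l (List.mem_cons_of_mem m hl))
      have hlen2 : (pre ++ m :: rest).length = start + 1 + rest.length := by
        simp only [List.length_append, List.length_cons]; omega
      rw [hlen2]
      have harith : start + 1 + rest.length - 1 + 1 - start = rest.length + 1 := by omega
      rw [harith]
      have htake : (m :: rest).take (rest.length + 1) = m :: rest :=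
        List.take_of_length_le (by simp)
      rw [htake, htt, buf_shape, strip_flatMap_eq_strip_join]
    | some j =>
      rw [hfe] at hend
      rw [hend]
      have harith : start + j + 1 - start = j + 1 := by omega
      rw [harith]
      obtain ⟨q, x, tail, e1, e2, e3, e4⟩ := findIdx?_split hasParenLC (m :: rest) j hfe
      have hw2 : (m :: rest).dropWhile (fun l => !hasParenLC l) = x :: tail := by
        rw [e1]
        exact dropWhile_mid _ q x tail (fun l hl => by rw [e3 l hl]; rfl) (by rw [e4]; rfl)
      rw [hw2] at hDa
      have hD3 : ¬ ((isModLC x && (tail.any (fun l => !l.isEmpty))) = true) :=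
        fun h => hDa h
      simp only [Bool.and_eq_true, not_and] at hD3
      by_cases hmx : isModLC x = true
      · -- first ');' line is module-prefixed: all following lines must be blank
        have hany := hD3 hmx
        have hof : (tail.any (fun l => !l.isEmpty)) = false := by
          cases hv : tail.any (fun l => !l.isEmpty) with
          | false => rfl
          | true => exact absurd hv hany
        have hblank : ∀ l ∈ tail, l = [] := by
          intro l hl
          have := List.any_eq_false.mp hof l hl
          simpa [List.isEmpty_iff] using this
        -- q has no paren; x is module so not an end; tail is blank so no end
        cases q with
        | nil =>
          -- x = m is the start line itself
          simp only [List.nil_append] at e1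
          injection e1 with em etail
          subst em; subst etail
          simp only [List.length_nil] at e2
          rw [← e2]
          simp only [List.take_succ_cons, List.take_zero]
          have htt : takeThrough rest = rest := by
            apply takeThrough_of_no_paren
            intro l hl; rw [hblank l hl]; decide
          rw [htt]
          rw [flatMap_all_empty rest hblank, strip_append_replicate]
          rw [show m ++ [' '] = (m :: ([] : List (List Char))).flatMap (· ++ [' ']) from by simp]
          rw [strip_flatMap_eq_strip_join]
        | cons q0 qs =>
          -- m = q0, rest = qs ++ x :: tail
          simp only [List.cons_append] at e1
          injection e1 with em erest
          subst em
          have e3' : ∀ l ∈ qs, hasParenLC l = false :=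
            fun l hl => e3 l (List.mem_cons_of_mem m hl)
          rw [erest]
          have hmEnd : bIsEnd x = false := by simp [bIsEnd, hmx]
          have httail : takeThrough tail = tail :=
            takeThrough_of_no_paren tail (fun l hl => by rw [hblank l hl]; decide)
          have htt : takeThrough (qs ++ x :: tail) = qs ++ x :: tail := by
            rw [takeThrough_skip qs (x :: tail) e3']
            simp only [takeThrough, hmEnd, Bool.false_eq_true, if_false, httail]
          rw [htt]
          have hjq : j = qs.length + 1 := by
            simp only [List.length_cons] at e2; omega
          rw [hjq]
          have htake : (m :: (qs ++ x :: tail)).take (qs.length + 1 + 1)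
              = m :: (qs ++ [x]) := by
            simp only [List.take_succ_cons]
            rw [take_mid]
          rw [htake]
          have hsplit : m :: (qs ++ x :: tail) = (m :: (qs ++ [x])) ++ tail := by simp
          rw [buf_shape, hsplit, List.flatMap_append, flatMap_all_empty tail hblank,
            strip_append_replicate, strip_flatMap_eq_strip_join]
      · -- first ');' line is not module-prefixed: A ends exactly there too
        have hmx' : isModLC x = false := by rwa [Bool.not_eq_true] at hmx
        have hxEnd : bIsEnd x = true := by simp [bIsEnd, e4, hmx']
        cases q with
        | nil =>
          -- impossible: q = [] means x = m, but m is module-prefixed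
          simp only [List.nil_append] at e1
          injection e1 with em _
          rw [← em] at hmx'
          rw [h4] at hmx'
          exact absurd hmx' (by simp)
        | cons q0 qs =>
          simp only [List.cons_append] at e1
          injection e1 with em erest
          subst em
          have e3' : ∀ l ∈ qs, hasParenLC l = false :=
            fun l hl => e3 l (List.mem_cons_of_mem m hl)
          rw [erest]
          have htt : takeThrough (qs ++ x :: tail) = qs ++ [x] := by
            rw [takeThrough_skip qs (x :: tail) e3']
            simp only [takeThrough, hxEnd, if_pos]
          rw [htt]
          have hjq : j = qs.length + 1 := by
            simp only [List.length_cons] at e2; omega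
          rw [hjq]
          have htake : (m :: (qs ++ x :: tail)).take (qs.length + 1 + 1)
              = m :: (qs ++ [x]) := by
            simp only [List.take_succ_cons]
            rw [take_mid]
          rw [htake, buf_shape, strip_flatMap_eq_strip_join]

lemma string_cnt_ne (a b : List Char) (h : cntNS b < cntNS a) :
    String.mk a ≠ String.mk b := by
  intro he
  have hts : ∀ l : List Char, (String.mk l).toList = l := fun l => Eq.symm (String.ofList_eq.mp rfl)
  have h2 := congrArg String.toList he
  rw [hts, hts] at h2
  rw [h2] at h
  omega

lemma strip_flatMap_cnt (p0 : List Char) (P T : List (List Char))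
    (hT : 0 < cntNS (T.flatMap (· ++ [' ']))) :
    cntNS (PySem.Chars.strip (PySem.Chars.join [' '] (p0 :: P))) <
      cntNS (PySem.Chars.strip (((p0 :: P) ++ T).flatMap (· ++ [' ']))) := by
  rw [cntNS_strip, cntNS_strip, List.flatMap_append, cntNS_append]
  have hj : cntNS ((p0 :: P).flatMap (· ++ [' ']))
      = cntNS (PySem.Chars.join [' '] (p0 :: P)) := by
    rw [flatMap_space_eq_join, cntNS_append, cntNS_space_singleton]
    omega
  omega

-- ===== VERDICT (by name: the statements are the Claim_ definitions above) =====
theorem buffer_signature_py_spec : Claim_unchanged_buffer_signature_py := by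
  intro v _ hD
  unfold buffer_signature_py buffer_signature_py_alt
  rw [bufLoopA_eq_loopAS]
  rw [show (PySem.Chars.splitlines v.toList).map PySem.Chars.strip = stripLines v from rfl]
  rw [main_eq v hD]
  cases hfi : (stripLines v).findIdx? isModLC with
  | none => rfl
  | some start => rfl

theorem buffer_signature_py_changed : Claim_changed_buffer_signature_py := by
  unfold Claim_changed_buffer_signature_py
  refine ⟨by decide, by decide, rfl, rfl, ?_⟩
  intro h
  have := congrArg String.toList h
  simp [pvDiffWitnessOut_buffer_signature_py] at this

theorem buffer_signature_py_tight : Claim_exact_buffer_signature_py := by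
  intro v _ hD
  unfold D_buffer_signature_py at hD
  rw [show (PySem.Chars.splitlines v.toList).map PySem.Chars.strip = stripLines v from rfl] at hD
  cases hW2 : ((stripLines v).dropWhile (fun l => !isModLC l)).dropWhile (fun l => !hasParenLC l) with
  | nil => rw [hW2] at hD; simp at hD
  | cons x r =>
    rw [hW2] at hD
    have hxr : (isModLC x && r.any (fun l => !l.isEmpty)) = true := hD
    simp only [Bool.and_eq_true] at hxr
    obtain ⟨hx, hany⟩ := hxr
    cases hW1 : (stripLines v).dropWhile (fun l => !isModLC l) with
    | nil => rw [hW1] at hW2; simp at hW2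
    | cons m rest =>
      rw [hW1] at hW2
      obtain ⟨pre, hL, hpre, hm⟩ := dropWhile_not_decomp isModLC _ m rest hW1
      obtain ⟨q, hmr, hq, hxp⟩ := dropWhile_not_decomp hasParenLC _ x r hW2
      have hfiA : (stripLines v).findIdx? isModLC = some pre.length := by
        rw [hL]; exact findIdx?_of_decomp isModLC pre m rest hpre hm
      have hfiB : (m :: rest).findIdx? hasParenLC = some q.length := by
        rw [hmr]; exact findIdx?_of_decomp hasParenLC q x r hq hxp
      -- A's value
      have hA : buffer_signature_py v
          = String.mk (PySem.Chars.strip ((m :: takeThrough rest).flatMap (· ++ [' ']))) := by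
        unfold buffer_signature_py
        rw [bufLoopA_eq_loopAS]
        rw [show (PySem.Chars.splitlines v.toList).map PySem.Chars.strip = stripLines v from rfl,
          hL, loopAS_skip pre (m :: rest) [] hpre]
        simp only [loopAS]
        rw [if_pos hm, loopAS_inside]
        simp only [List.nil_append]
        rw [buf_shape]
      -- B's value
      have hdropL : (stripLines v).drop pre.length = m :: rest := by rw [hL]; simp
      have hend : bFindEnd (stripLines v) pre.length = pre.length + q.length := by
        unfold bFindEnd
        rw [hdropL, hfiB]
      have hB : buffer_signature_py_alt v
          = String.mk (PySem.Chars.strip (PySem.Chars.join [' '] (q ++ [x]))) := by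
        unfold buffer_signature_py_alt
        rw [hfiA]
        show String.mk (PySem.Chars.strip (PySem.Chars.join [' ']
          (PySem.List.slice (stripLines v) (some ((pre.length : Nat) : Int))
            (some ((bFindEnd (stripLines v) pre.length : Int) + 1))))) = _
        rw [hend]
        have hcast : ((pre.length + q.length : Nat) : Int) + 1
            = ((pre.length + q.length + 1 : Nat) : Int) := by push_cast; ring
        rw [hcast, PySem.List.slice_natCast, hdropL]
        have harith : pre.length + q.length + 1 - pre.length = q.length + 1 := by omega
        rw [harith, hmr, take_mid]
      -- the nonempty tail line survives into A's extra buffered content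
      have hmemL : ∀ e ∈ r, e ∈ stripLines v := by
        intro e he
        rw [hL, hmr]
        exact List.mem_append_right pre (List.mem_append_right q (List.mem_cons_of_mem x he))
      have hT : 0 < cntNS ((takeThrough r).flatMap (· ++ [' '])) := by
        obtain ⟨e, he, hne⟩ := List.any_eq_true.mp hany
        have hne' : e ≠ [] := by simpa [List.isEmpty_iff] using hne
        obtain ⟨e', he', hp'⟩ := takeThrough_cnt r
          (fun a ha hnil => cntNS_mem_stripLines v a (hmemL a ha) hnil) ⟨e, he, hne'⟩
        exact cntNS_flatMap_pos (takeThrough r) e' he' hp'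
      -- A's list is B's list followed by takeThrough r
      rw [hA, hB]
      cases q with
      | nil =>
        simp only [List.nil_append] at hmr
        injection hmr with hm1 hm2
        subst hm1; subst hm2
        exact string_cnt_ne _ _ (strip_flatMap_cnt m [] (takeThrough rest) hT)
      | cons q0 qs =>
        rw [List.cons_append] at hmr
        injection hmr with hm1 hm2
        subst hm1; subst hm2
        have hqs : ∀ l ∈ qs, hasParenLC l = false :=
          fun l hl => hq l (List.mem_cons_of_mem m hl)
        have hbx : bIsEnd x = false := by simp [bIsEnd, hx]
        have hlist : m :: takeThrough (qs ++ x :: r)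
            = (m :: (qs ++ [x])) ++ takeThrough r := by
          rw [takeThrough_skip qs (x :: r) hqs]
          simp only [takeThrough, hbx, Bool.false_eq_true, if_false]
          simp
        rw [hlist]
        exact string_cnt_ne _ _ (strip_flatMap_cnt m (qs ++ [x]) (takeThrough r) hT)
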